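-- pv_equiv track=rewrite | github.com/maksimsarychau/hsk_card_generator | hsk_card_generator/geometry.py | _wrap_hard_line
-- ===== SOURCE A (Python) =====
-- def _wrap_hard_line(line: str, limit: int) -> str:
--     normalized = " / ".join(part.strip() for part in line.split("/")).strip()
--     if not normalized:
--         return ""
--     lines: list[str] = []
--     current = ""
--     for token in normalized.split():
--         for chunk in _split_token(token, limit):
--             candidate = f"{current} {chunk}".strip() if current else chunk
--             if len(candidate) <= limit or not current:
--                 current = candidate
--             else:
--                 lines.append(current)
--                 current = chunk
--     if current:
--         lines.append(current)
--     return "\n".join(lines)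
--
-- def _split_token(token: str, limit: int) -> list[str]:
--     if len(token) <= limit:
--         return [token]
--     return [token[index : index + limit] for index in range(0, len(token), limit)]
-- ===== SOURCE B (Python) =====
-- def _split_token(token: str, limit: int) -> list[str]:
--     if len(token) <= limit:
--         return [token]
--     return [token[index : index + limit] for index in range(0, len(token), limit)]
--
--
-- def _wrap_hard_line(line: str, limit: int) -> str:
--     normalized = " / ".join(part.strip() for part in line.split("/")).strip()
--     if not normalized:
--         return ""
--     pieces: list[str] = []
--     for token in normalized.split():
--         pieces += _split_token(token, limit)
--     out_lines: list[str] = []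
--     i, n = 0, len(pieces)
--     while i < n:
--         cur = pieces[i]
--         i += 1
--         while i < n and len(cur) + 1 + len(pieces[i]) <= limit:
--             cur = cur + " " + pieces[i]
--             i += 1
--         out_lines.append(cur)
--     return "\n".join(out_lines)
-- ===== Notes on version B (the rewrite author's own statement) =====
-- stated objective: alternative
-- what changed: A interleaves splitting and wrapping in one nested token/chunk loop with a strip-and-retry candidate string; B first flattens all tokens into one list of atomic pieces and then packs each output line with a separate inner fitting scan over that list, appending one finished line per outer round.
import Mathlib
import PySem

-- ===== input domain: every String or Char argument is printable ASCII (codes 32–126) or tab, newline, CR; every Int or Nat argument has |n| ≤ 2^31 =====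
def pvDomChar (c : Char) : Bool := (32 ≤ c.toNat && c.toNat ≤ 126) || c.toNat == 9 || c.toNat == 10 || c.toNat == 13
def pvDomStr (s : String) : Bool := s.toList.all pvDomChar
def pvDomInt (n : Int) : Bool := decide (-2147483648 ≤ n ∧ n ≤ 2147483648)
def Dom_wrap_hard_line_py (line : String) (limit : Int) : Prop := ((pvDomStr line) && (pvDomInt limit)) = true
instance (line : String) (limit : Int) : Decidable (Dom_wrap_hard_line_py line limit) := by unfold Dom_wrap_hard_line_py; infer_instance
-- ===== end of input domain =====

-- B replaces A's nested token/chunk greedy loop by first flattening all chunks into one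
-- list and then packing each whole output line with an inner fitting scan (objective:
-- alternative decomposition, similar cost; normalization and _split_token kept identical).

-- ===== PORT A =====
-- shared helper: the normalization step (textually identical line of code in Source A and Source B)
def pvNormalize (line : String) : List Char :=
  PySem.Chars.strip (PySem.Chars.join (" / ".toList)
    ((PySem.Chars.splitOn line.toList ['/']).map PySem.Chars.strip))

-- shared helper: _split_token (textually identical function in Source A and Source B)
def pvSplitToken (token : List Char) (limit : Int) : List (List Char) :=
  if (token.length : Int) ≤ limit then [token]
  else (PySem.List.pyRange 0 token.length limit).map
        (fun index => PySem.Chars.slice token (some index) (some (index + limit)))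

-- the body of A's inner `for chunk in _split_token(...)` loop, on state (lines, current)
def pvStepA (limit : Int) (st : List (List Char) × List Char) (chunk : List Char) :
    List (List Char) × List Char :=
  let candidate := if st.2.isEmpty then chunk else PySem.Chars.strip (st.2 ++ ' ' :: chunk)
  if (candidate.length : Int) ≤ limit ∨ st.2.isEmpty = true then (st.1, candidate)
  else (st.1 ++ [st.2], chunk)

def wrap_hard_line_py (line : String) (limit : Int) : String :=
  let normalized := pvNormalize line
  if normalized.isEmpty then "" else
  let st := (PySem.Chars.split₀ normalized).foldl
      (fun st token => (pvSplitToken token limit).foldl (pvStepA limit) st) ([], [])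
  let lines := if st.2.isEmpty then st.1 else st.1 ++ [st.2]
  String.ofList (PySem.Chars.join ['\n'] lines)

-- ===== PORT B =====
-- Source B's inner `while i < n and len(cur) + 1 + len(pieces[i]) <= limit` scan:
-- it extends cur with the pieces that fit and returns the finished line and the rest
def pvFill (limit : Int) : List Char → List (List Char) → List Char × List (List Char)
  | cur, [] => (cur, [])
  | cur, q :: rest =>
    if (cur.length : Int) + 1 + (q.length : Int) ≤ limit then pvFill limit (cur ++ ' ' :: q) rest
    else (cur, q :: rest)

-- termination fact for pvPack (cited by its decreasing_by)
theorem pvFill_snd_le (limit : Int) (cur : List Char) (l : List (List Char)) :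
    (pvFill limit cur l).2.length ≤ l.length := by
  induction l generalizing cur with
  | nil => simp [pvFill]
  | cons q rest ih =>
    simp only [pvFill]
    split
    · exact le_trans (ih _) (Nat.le_succ _)
    · simp

-- Source B's outer `while i < n` loop: each round emits one finished output line
def pvPack (limit : Int) : List (List Char) → List (List Char)
  | [] => []
  | p :: rest => (pvFill limit p rest).1 :: pvPack limit (pvFill limit p rest).2
termination_by l => l.length
decreasing_by exact Nat.lt_succ_of_le (pvFill_snd_le limit p rest)

def wrap_hard_line_py_alt (line : String) (limit : Int) : String :=
  let normalized := pvNormalize line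
  if normalized.isEmpty then "" else
  let pieces := (PySem.Chars.split₀ normalized).foldl
      (fun acc token => acc ++ pvSplitToken token limit) []
  String.ofList (PySem.Chars.join ['\n'] (pvPack limit pieces))

-- ===== PRECONDITION & SPEC =====
-- Pre_ excludes exactly the inputs where the Python A raises ValueError (range() with
-- step 0 inside _split_token): limit = 0 together with a line containing any
-- non-whitespace character. Everywhere else A returns normally.
def Pre_wrap_hard_line_py (line : String) (limit : Int) : Prop :=
  limit ≠ 0 ∨ line.toList.all PySem.Chars.isspace = true
instance (line : String) (limit : Int) : Decidable (Pre_wrap_hard_line_py line limit) := by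
  unfold Pre_wrap_hard_line_py; infer_instance

def pvWitness_wrap_hard_line_py : String × Int := ("alpha beta/gamma delta", 7)

def Spec_wrap_hard_line_py (line : String) (limit : Int) (out : String) : Prop :=
  out = wrap_hard_line_py_alt line limit
instance (line : String) (limit : Int) (out : String) :
    Decidable (Spec_wrap_hard_line_py line limit out) := by
  unfold Spec_wrap_hard_line_py; infer_instance

-- ===== CLAIM (what is proved, stated in full; the proofs are below) =====
def Claim_equal_wrap_hard_line_py : Prop := ∀ (line : String) (limit : Int), Dom_wrap_hard_line_py line limit → Pre_wrap_hard_line_py line limit → Spec_wrap_hard_line_py line limit (wrap_hard_line_py line limit)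

-- ===== LEMMAS AND PROOFS =====

-- every token produced by s.split() is nonempty and whitespace-free (invariant of split₀.go)
theorem pvSplit0_go_good (s cur : List Char) (acc : List (List Char))
    (hacc : ∀ t ∈ acc, t ≠ [] ∧ ∀ c ∈ t, PySem.Chars.isspace c = false)
    (hcur : ∀ c ∈ cur, PySem.Chars.isspace c = false) :
    ∀ t ∈ PySem.Chars.split₀.go s cur acc, t ≠ [] ∧ ∀ c ∈ t, PySem.Chars.isspace c = false := by
  induction s generalizing cur acc with
  | nil =>
    intro t ht
    simp only [PySem.Chars.split₀.go] at ht
    split at ht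
    · exact hacc t (by simpa using ht)
    · rename_i hne
      rcases (by simpa using ht : t ∈ acc ∨ t = cur.reverse) with h | h
      · exact hacc t h
      · subst h
        refine ⟨by simpa using fun h => hne (by simp [h]), ?_⟩
        intro c hc; exact hcur c (by simpa using hc)
  | cons c rest ih =>
    intro t ht
    simp only [PySem.Chars.split₀.go] at ht
    split at ht
    · split at ht
      · exact ih [] acc hacc (by simp) t ht
      · rename_i hne
        refine ih [] (cur.reverse :: acc) ?_ (by simp) t ht
        intro u hu
        rcases List.mem_cons.mp hu with hu | hu
        · subst hu
          exact ⟨by simpa using fun h => hne (by simp [h]),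
            fun d hd => hcur d (by simpa using hd)⟩
        · exact hacc u hu
    · rename_i hc
      refine ih (c :: cur) acc hacc ?_ t ht
      intro d hd
      rcases List.mem_cons.mp hd with hd | hd
      · subst hd; simpa using hc
      · exact hcur d hd

theorem pvSplit0_good (s : List Char) :
    ∀ t ∈ PySem.Chars.split₀ s, t ≠ [] ∧ ∀ c ∈ t, PySem.Chars.isspace c = false :=
  pvSplit0_go_good s [] [] (by simp) (by simp)

-- a "good" piece: nonempty, whitespace-free, and it fits the limit
def pvGood (limit : Int) (p : List Char) : Prop :=
  p ≠ [] ∧ (∀ c ∈ p, PySem.Chars.isspace c = false) ∧ (p.length : Int) ≤ limit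

theorem pvSplitToken_good (limit : Int) (t : List Char) (h1 : 1 ≤ limit) (ht : t ≠ [])
    (hws : ∀ c ∈ t, PySem.Chars.isspace c = false) :
    ∀ p ∈ pvSplitToken t limit, pvGood limit p := by
  intro p hp
  unfold pvSplitToken at hp
  split at hp
  · rename_i hle
    rcases (by simpa using hp : p = t) with rfl
    exact ⟨ht, hws, hle⟩
  · rcases List.mem_map.mp hp with ⟨i, hi, rfl⟩
    rcases (PySem.List.mem_pyRange_iff_of_pos (by omega) i).mp hi with ⟨h0, hlt, -⟩
    have hlen : 1 ≤ (PySem.Chars.slice t (some i) (some (i + limit))).length ∧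
        ((PySem.Chars.slice t (some i) (some (i + limit))).length : Int) ≤ limit := by
      simp [PySem.Chars.slice_eq_listSlice, PySem.List.slice, PySem.List.clampIdx]
      constructor <;> split_ifs <;> omega
    refine ⟨by rw [← List.length_pos_iff]; omega, ?_, hlen.2⟩
    intro c hc
    exact hws c (PySem.List.mem_of_mem_slice _ _ _ (by simpa using hc))

theorem pvSplitToken_nonpos (limit : Int) (t : List Char) (h0 : limit ≤ 0) (ht : t ≠ []) :
    pvSplitToken t limit = [] := by
  unfold pvSplitToken
  rw [if_neg (by have := List.length_pos_of_ne_nil ht; omega)]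
  rcases eq_or_lt_of_le h0 with rfl | hneg
  · simp [PySem.List.pyRange]
  · unfold PySem.List.pyRange
    rw [if_neg (by omega), if_neg (by omega)]
    rw [if_neg (by omega : ¬ ((t.length : Int) < 0))]
    simp

-- edges of a line under construction: nonempty, head and last not whitespace
def pvNice (cs : List Char) : Prop :=
  cs ≠ [] ∧ cs.head?.all (fun c => !PySem.Chars.isspace c) = true
    ∧ cs.getLast?.all (fun c => !PySem.Chars.isspace c) = true

theorem pvNice_of_parts (p : List Char) (hne : p ≠ [])
    (hws : ∀ c ∈ p, PySem.Chars.isspace c = false) : pvNice p := by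
  refine ⟨hne, ?_, ?_⟩
  · rcases p with - | ⟨a, t⟩
    · simp at hne
    · simpa using hws a (by simp)
  · rcases h : p.getLast? with - | b
    · simp
    · simpa using hws b (List.mem_of_getLast? h)

theorem pvNice_of_good (limit : Int) (p : List Char) (h : pvGood limit p) : pvNice p :=
  pvNice_of_parts p h.1 h.2.1

theorem pvNice_append (x y : List Char) (hx : pvNice x) (hy : pvNice y) :
    pvNice (x ++ ' ' :: y) := by
  obtain ⟨hxne, hxh, hxl⟩ := hx
  obtain ⟨hyne, hyh, hyl⟩ := hy
  refine ⟨by simp, ?_, ?_⟩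
  · rw [List.head?_append_of_ne_nil x hxne]; exact hxh
  · rw [show x ++ ' ' :: y = (x ++ [' ']) ++ y by simp]
    rw [List.getLast?_append_of_ne_nil _ hyne]; exact hyl

-- on a nice line .strip() is the identity, so A's candidate is just cur ++ ' ' :: chunk
theorem pvStrip_of_nice (cs : List Char) (h : pvNice cs) : PySem.Chars.strip cs = cs := by
  obtain ⟨hne, hh, hl⟩ := h
  have hl1 : PySem.Chars.lstrip cs = cs := by
    rcases cs with - | ⟨a, t⟩
    · rfl
    · simp only [Option.all_some, List.head?_cons] at hh
      simp [PySem.Chars.lstrip, by simpa using hh]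
  rw [PySem.Chars.strip, hl1]
  rcases hrev : cs.reverse with - | ⟨b, r⟩
  · simp at hrev; simp [hrev] at hne
  · have hb : cs.getLast? = some b := by
      rw [← List.head?_reverse, hrev]; rfl
    rw [hb] at hl
    simp only [Option.all_some] at hl
    rw [PySem.Chars.rstrip, hrev, List.dropWhile_cons, if_neg (by simpa using hl)]
    rw [← hrev, List.reverse_reverse]

-- the main invariant: A's fold over the remaining pieces, finalized, is the already
-- flushed lines followed by B's line packing started from the current line `cur`
theorem pvLoop (limit : Int) (ps : List (List Char)) (cur : List Char)
    (lines : List (List Char)) (hps : ∀ p ∈ ps, pvGood limit p) (hcur : pvNice cur)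
    (hlen : (cur.length : Int) ≤ limit) :
    (let st := ps.foldl (pvStepA limit) (lines, cur)
     if st.2.isEmpty then st.1 else st.1 ++ [st.2]) =
      lines ++ (pvFill limit cur ps).1 :: pvPack limit (pvFill limit cur ps).2 := by
  induction ps generalizing cur lines with
  | nil =>
    simp only [List.foldl_nil, pvFill, pvPack]
    rw [if_neg (by simpa [List.isEmpty_iff] using hcur.1)]
  | cons p rest ih =>
    have hgp := hps p (by simp)
    obtain ⟨c0, ct, rfl⟩ : ∃ c0 ct, cur = c0 :: ct := by
      rcases cur with - | ⟨a, b⟩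
      · exact absurd rfl hcur.1
      · exact ⟨a, b, rfl⟩
    have hco : pvNice (c0 :: ct ++ ' ' :: p) :=
      pvNice_append _ _ hcur (pvNice_of_good limit p hgp)
    have hstep : pvStepA limit (lines, c0 :: ct) p =
        if ((c0 :: ct).length : Int) + 1 + (p.length : Int) ≤ limit then
          (lines, c0 :: ct ++ ' ' :: p)
        else (lines ++ [c0 :: ct], p) := by
      simp only [pvStepA, List.isEmpty_cons, Bool.false_eq_true, if_false, or_false]
      rw [pvStrip_of_nice _ hco]
      have hc1 : (((c0 :: ct ++ ' ' :: p).length : Int) ≤ limit) ↔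
          (((c0 :: ct).length : Int) + 1 + (p.length : Int) ≤ limit) := by
        simp
        omega
      simp only [hc1]
    simp only [List.foldl_cons, hstep, pvFill]
    by_cases hfit : (((c0 :: ct).length : Int)) + 1 + (p.length : Int) ≤ limit
    · rw [if_pos hfit, if_pos hfit]
      have hlen' : (((c0 :: ct) ++ ' ' :: p).length : Int) ≤ limit := by
        simp only [List.length_cons, List.length_append] at hfit ⊢
        push_cast at hfit ⊢
        omega
      exact ih _ _ (fun q hq => hps q (by simp [hq])) hco hlen'
    · rw [if_neg hfit, if_neg hfit]
      have := ih p (lines ++ [c0 :: ct]) (fun q hq => hps q (by simp [hq]))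
        (pvNice_of_good limit p hgp) hgp.2.2
      simp only [pvPack]
      rw [this]
      simp

-- the two ports agree on every input (the Lean ports are total; Pre_ is only about
-- where the Python A raises)
theorem pvMain (line : String) (limit : Int) :
    wrap_hard_line_py line limit = wrap_hard_line_py_alt line limit := by
  unfold wrap_hard_line_py wrap_hard_line_py_alt
  by_cases hN : (pvNormalize line).isEmpty
  · simp [hN]
  · simp only [hN, if_false, Bool.false_eq_true]
    have htoks := pvSplit0_good (pvNormalize line)
    have hB : (PySem.Chars.split₀ (pvNormalize line)).foldl
        (fun acc token => acc ++ pvSplitToken token limit) [] =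
        (PySem.Chars.split₀ (pvNormalize line)).flatMap (fun t => pvSplitToken t limit) := by
      simpa using PySem.List.foldl_append_eq_flatMap (fun t => pvSplitToken t limit)
        (PySem.Chars.split₀ (pvNormalize line)) []
    have hA : (PySem.Chars.split₀ (pvNormalize line)).foldl
        (fun st token => (pvSplitToken token limit).foldl (pvStepA limit) st) ([], []) =
        ((PySem.Chars.split₀ (pvNormalize line)).flatMap (fun t => pvSplitToken t limit)).foldl
          (pvStepA limit) ([], []) := by
      rw [List.flatMap_def, List.foldl_flatten, List.foldl_map]
    rw [hA, hB]
    set pieces := (PySem.Chars.split₀ (pvNormalize line)).flatMap (fun t => pvSplitToken t limit)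
      with hpieces
    by_cases hlim : limit ≤ 0
    · have : pieces = [] := by
        rw [hpieces, List.flatMap_eq_nil_iff]
        intro t ht
        exact pvSplitToken_nonpos limit t hlim (htoks t ht).1
      simp [this, pvPack]
    · have hgood : ∀ p ∈ pieces, pvGood limit p := by
        intro p hp
        rw [hpieces] at hp
        rcases List.mem_flatMap.mp hp with ⟨t, ht, hpt⟩
        exact pvSplitToken_good limit t (by omega) (htoks t ht).1 (htoks t ht).2 p hpt
      rcases hp : pieces with - | ⟨p0, rest⟩
      · simp [pvPack]
      · have h0 : pvStepA limit ([], []) p0 = ([], p0) := by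
          simp [pvStepA]
        rw [List.foldl_cons, h0]
        have hg0 := hgood p0 (by rw [hp]; simp)
        have := pvLoop limit rest p0 [] (fun q hq => hgood q (by rw [hp]; simp [hq]))
          (pvNice_of_good limit p0 hg0) hg0.2.2
        simp only [this]
        simp [pvPack]

-- ===== VERDICT (by name: the statement is the Claim_ definition above) =====
theorem wrap_hard_line_py_spec : Claim_equal_wrap_hard_line_py := by
  intro line limit _ _
  unfold Spec_wrap_hard_line_py
  exact pvMain line limit
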